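-- pv_equiv track=rewrite | github.com/Avazart/YouTubeScannerBot | app/auxiliary_utils.py | batched_evenly
-- ===== SOURCE A (Python) =====
-- import math
-- from typing import Optional, Sequence, Iterator
--
-- def batched_evenly(seq: Sequence, max_batch_size: int) -> Iterator[Sequence]:
--     """Batch data evenly with max_batch_size."""
--
--     # batched_evenly('1234567', 3) --> 123 45 67
--
--     total = len(seq)
--     batch_count = math.ceil(total / max_batch_size)
--
--     i = 0
--     while i < total:
--         batch_size = math.ceil((total - i) / batch_count)
--         batch = seq[i : i + batch_size]
--         yield batch
--         i += batch_size
--         batch_count -= 1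
-- ===== SOURCE B (Python) =====
-- import math
--
--
-- def batched_evenly(seq, max_batch_size):
--     """Batch data evenly with max_batch_size."""
--     total = len(seq)
--     batch_count = math.ceil(total / max_batch_size)
--     if batch_count <= 0:
--         return
--     base, rem = divmod(total, batch_count)
--     i = 0
--     for j in range(batch_count):
--         size = base + 1 if j < rem else base
--         yield seq[i:i + size]
--         i += size
-- ===== Notes on version B (the rewrite author's own statement) =====
-- stated objective: alternative
-- what changed: B precomputes the batch layout once with divmod(total, batch_count) and yields rem batches of size base+1 then the rest of size base over a for-range, instead of A's while-loop that recomputes a ceiling division of the shrinking remainder at every step.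
-- outside the precondition, e.g. on batched_evenly([1], -1): A does not finish within the time limit, B returns []; on batched_evenly([], 0): A raises ZeroDivisionError, B raises ZeroDivisionError
import Mathlib
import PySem

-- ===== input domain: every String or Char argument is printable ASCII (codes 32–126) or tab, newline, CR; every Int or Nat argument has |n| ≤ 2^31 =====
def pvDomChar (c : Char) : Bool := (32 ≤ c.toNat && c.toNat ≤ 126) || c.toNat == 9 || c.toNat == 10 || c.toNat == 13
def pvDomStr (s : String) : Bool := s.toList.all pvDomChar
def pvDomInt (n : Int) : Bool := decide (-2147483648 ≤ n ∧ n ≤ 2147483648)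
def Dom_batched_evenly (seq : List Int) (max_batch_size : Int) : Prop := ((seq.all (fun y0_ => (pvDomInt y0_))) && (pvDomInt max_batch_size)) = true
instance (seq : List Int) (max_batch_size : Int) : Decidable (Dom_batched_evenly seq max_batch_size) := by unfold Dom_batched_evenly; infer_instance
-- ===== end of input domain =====

-- B precomputes the even batch layout once via divmod instead of re-doing a ceiling
-- division of the shrinking remainder at every step (alternative decomposition, same cost).
-- Both Pythons are generators; equivalence is about the list of yielded batches.


-- ===== PORT A =====
-- math.ceil(a / b) ported as exact integer ceiling division -((-a) // b); exact for the
-- list lengths and divisors admitted here (float division of such small ints is exact enough).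
def pvCeilDiv (a b : Int) : Int := -(PySem.Int.floordiv (-a) b)

-- A's while-loop; the `1 ≤ bs` test is only a termination guard: under Pre_ it always
-- holds (Python diverges on the excluded inputs where it would fail).
def aLoop (seq : List Int) (total : Int) (bc : Int) (i : Int) : List (List Int) :=
  if _h : i < total then
    let bs := pvCeilDiv (total - i) bc
    if _hbs : 1 ≤ bs then
      PySem.List.slice seq (some i) (some (i + bs)) :: aLoop seq total (bc - 1) (i + bs)
    else []
  else []
termination_by (total - i).toNat
decreasing_by omega

def batched_evenly (seq : List Int) (max_batch_size : Int) : List (List Int) :=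
  let total : Int := seq.length
  let batch_count := pvCeilDiv total max_batch_size
  aLoop seq total batch_count 0

-- ===== PORT B =====
-- B's for-loop over range(batch_count): j is the loop index, i the running offset.
def bLoop (seq : List Int) (base rem : Int) : Nat → Int → Int → List (List Int)
  | 0, _, _ => []
  | n + 1, j, i =>
    let size := if j < rem then base + 1 else base
    PySem.List.slice seq (some i) (some (i + size)) :: bLoop seq base rem n (j + 1) (i + size)

def batched_evenly_alt (seq : List Int) (max_batch_size : Int) : List (List Int) :=
  let total : Int := seq.length
  let batch_count := pvCeilDiv total max_batch_size
  if batch_count ≤ 0 then []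
  else
    let base := PySem.Int.floordiv total batch_count
    let rem := PySem.Int.mod total batch_count
    bLoop seq base rem batch_count.toNat 0 0

-- ===== PRECONDITION & SPEC =====
-- Pre_ excludes max_batch_size = 0 (A raises ZeroDivisionError) and max_batch_size < 0 on a
-- non-empty seq (A is an infinite generator there); on an empty seq any nonzero size is fine.
def Pre_batched_evenly (seq : List Int) (max_batch_size : Int) : Prop :=
  0 < max_batch_size ∨ (seq = [] ∧ max_batch_size ≠ 0)
instance (seq : List Int) (max_batch_size : Int) : Decidable (Pre_batched_evenly seq max_batch_size) := by unfold Pre_batched_evenly; infer_instance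
def pvWitness_batched_evenly : List Int × Int := ([1, 2, 3, 4, 5, 6, 7], 3)

def Spec_batched_evenly (seq : List Int) (max_batch_size : Int) (out : List (List Int)) : Prop := out = batched_evenly_alt seq max_batch_size
instance (seq : List Int) (max_batch_size : Int) (out : List (List Int)) : Decidable (Spec_batched_evenly seq max_batch_size out) := by unfold Spec_batched_evenly; infer_instance

-- ===== CLAIM (what is proved, stated in full; the proofs are below) =====
def Claim_equal_batched_evenly : Prop := ∀ (seq : List Int) (max_batch_size : Int), Dom_batched_evenly seq max_batch_size → Pre_batched_evenly seq max_batch_size → Spec_batched_evenly seq max_batch_size (batched_evenly seq max_batch_size)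

-- ===== LEMMAS AND PROOFS =====

-- ceiling division of b*n + s by n, for 0 < n, 0 ≤ s ≤ n
lemma pvCeilDiv_split (b n s : Int) (hn : 0 < n) (hs0 : 0 ≤ s) (hsn : s ≤ n) :
    pvCeilDiv (b * n + s) n = b + (if 0 < s then 1 else 0) := by
  unfold pvCeilDiv
  rw [PySem.Int.neg_floordiv_neg_eq_iff_of_pos hn]
  constructor <;> split_ifs <;> nlinarith

-- Invariant tying A's per-step ceiling loop to B's precomputed layout: with n batches
-- left, offset i and loop index j, the remaining length is base*n plus max (rem-j) 0.
lemma loops_eq (seq : List Int) (base rem : Int) :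
    ∀ (n : Nat) (j i total : Int), 1 ≤ base →
      total - i = base * n + max (rem - j) 0 → rem - j ≤ (n : Int) →
      aLoop seq total (n : Int) i = bLoop seq base rem n j i := by
  intro n
  induction n with
  | zero =>
    intro j i total hb h2 h3
    have hni : ¬ i < total := by simp at h2; omega
    rw [aLoop, bLoop]
    simp [hni]
  | succ n ih =>
    intro j i total hb h2 h3
    push_cast at h2 h3
    have h2' : total - i = base * (n : Int) + base + max (rem - j) 0 := by linarith
    have hlt : i < total := by
      nlinarith [le_max_right (rem - j) (0 : Int),
        mul_nonneg (by omega : (0:Int) ≤ base) (by positivity : (0:Int) ≤ (n : Int))]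
    have hbs : pvCeilDiv (total - i) ((n : Int) + 1) = (if j < rem then base + 1 else base) := by
      have hsplit : total - i = base * ((n : Int) + 1) + max (rem - j) 0 := by linarith
      rw [hsplit, pvCeilDiv_split base ((n : Int) + 1) (max (rem - j) 0) (by positivity)
        (le_max_right _ _) (by omega)]
      split_ifs <;> omega
    have hcast : ((n + 1 : Nat) : Int) = (n : Int) + 1 := by push_cast; ring
    rw [aLoop]
    simp only [hcast, hlt, dif_pos, hbs]
    have h1 : (1 : Int) ≤ (if j < rem then base + 1 else base) := by split_ifs <;> omega
    rw [dif_pos h1]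
    show _ :: _ = bLoop seq base rem (n + 1) j i
    rw [bLoop]
    congr 1
    rw [show ((n : Int) + 1 - 1) = (n : Int) by ring]
    exact ih (j + 1) (i + (if j < rem then base + 1 else base)) total hb
      (by generalize base * (n : Int) = K at h2' ⊢; split_ifs at * <;> omega)
      (by omega)

-- ===== VERDICT (by name: the statement is the Claim_ definition above) =====
theorem batched_evenly_spec : Claim_equal_batched_evenly := by
  intro seq mbs _ hpre
  unfold Spec_batched_evenly batched_evenly batched_evenly_alt
  dsimp only
  rcases hpre with hpos | ⟨hnil, _⟩
  · set total : Int := (seq.length : Int) with htot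
    have ht0 : 0 ≤ total := by simp [htot]
    set bc := pvCeilDiv total mbs with hbc
    have hchar : (bc - 1) * mbs < total ∧ total ≤ bc * mbs :=
      (PySem.Int.neg_floordiv_neg_eq_iff_of_pos hpos).mp (by rw [hbc]; rfl)
    by_cases hz : total = 0
    · have hbc0 : bc = 0 := by
        rw [hbc, hz]; simp [pvCeilDiv, PySem.Int.floordiv]
      rw [hbc0, hz]
      rw [aLoop]
      simp
    · have ht1 : 1 ≤ total := by omega
      have hbc1 : 1 ≤ bc := by nlinarith [hchar.1, hchar.2]
      have hbclet : bc ≤ total := by nlinarith [hchar.1, hchar.2]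
      have hnle : ¬ bc ≤ 0 := by omega
      simp only [hnle, if_false]
      set base := PySem.Int.floordiv total bc with hbase
      set rem := PySem.Int.mod total bc with hrem
      have hdm : base * bc + rem = total := PySem.Int.floordiv_mul_add_mod total bc
      have hre : rem = total % bc := by
        rw [hrem, PySem.Int.mod_eq_emod_of_pos (by omega)]
      have hr0 : 0 ≤ rem := by rw [hre]; exact Int.emod_nonneg _ (by omega)
      have hrlt : rem < bc := by rw [hre]; exact Int.emod_lt_of_pos _ (by omega)
      have hb1 : 1 ≤ base := by
        rw [hbase, PySem.Int.le_floordiv_iff_mul_le (by omega)]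
        omega
      have hcast : ((bc.toNat : Int)) = bc := Int.toNat_of_nonneg (by omega)
      rw [← hcast]
      exact loops_eq seq base rem bc.toNat 0 0 total hb1
        (by rw [hcast]; have hmx : max rem 0 = rem := max_eq_left hr0; omega)
        (by rw [hcast]; omega)
  · subst hnil
    have h0 : pvCeilDiv ((([] : List Int).length : Int)) mbs = 0 := by
      simp [pvCeilDiv, PySem.Int.floordiv]
    simp only [h0]
    rw [aLoop]
    simp
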